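-- pv_equiv track=rewrite | github.com/premkumar6/SAVERX | CleanExcelSaveRxFiles.py | condense_lines
-- ===== SOURCE A (Python) =====
-- def condense_lines(list_of_dicts):
--     """
--     Take in a list of dictionaries and condense the information based on the key 'Dispensed NDC'.
--     If a row has a 'Dispensed NDC' value and the next row does not, combine specific values
--     for keys ('Escript prescribed item', 'Prescribed Item', and 'Dispensed Item') in the current and next rows
--     (concatenate the strings).
--
--     Args:
--         list_of_dicts (List): A list of dictionaries where each dictionary maps to a row of data.
--
--     Returns:
--         list_of_dicts (list): A list of dictionaries where data is condensed as specified.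
--     """
--     condensed_list = []  # Initialize a new list to store the condensed data
--     i = 0
--
--     while i < len(list_of_dicts):
--         current_dict = list_of_dicts[i]
--
--         if 'Dispensed NDC' in current_dict and current_dict['Dispensed NDC'] not in ['', 'nan']:
--             # If 'Dispensed NDC' is present and not empty or 'nan'
--             next_index = i + 1
--             while next_index < len(list_of_dicts) and ('Dispensed NDC' not in list_of_dicts[next_index] or list_of_dicts[next_index]['Dispensed NDC'] in ['', 'nan']):
--                 # Concatenate values for specific keys
--                 for key in ['Escript prescribed item', 'Prescribed Item', 'Dispensed Item']:
--                     string1 = str(current_dict.get(key, ''))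
--                     string2 = str(list_of_dicts[next_index].get(key, ''))
--                     #current_dict[key] = current_dict.get(key, '') + ' ' + list_of_dicts[next_index].get(key, '')
--                     current_dict[key] = string1 + ' ' + string2
--                 next_index += 1
--
--             condensed_list.append(current_dict)
--             i = next_index
--         else:
--             # If 'Dispensed NDC' is not present or is empty or 'nan', add the current row without changes
--             condensed_list.append(current_dict)
--             i += 1
--
--     return condensed_list
-- ===== SOURCE B (Python) =====
-- def condense_lines(list_of_dicts):
--     condensed_list = []
--     anchor = None  # most recent row with a valid 'Dispensed NDC', not yet flushed
--     for row in list_of_dicts: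
--         if 'Dispensed NDC' in row and row['Dispensed NDC'] not in ['', 'nan']:
--             if anchor is not None:
--                 condensed_list.append(anchor)
--             anchor = row
--         elif anchor is None:
--             condensed_list.append(row)
--         else:
--             for key in ['Escript prescribed item', 'Prescribed Item', 'Dispensed Item']:
--                 anchor[key] = str(anchor.get(key, '')) + ' ' + str(row.get(key, ''))
--     if anchor is not None:
--         condensed_list.append(anchor)
--     return condensed_list
-- ===== Notes on version B (the rewrite author's own statement) =====
-- stated objective: simpler
-- what changed: Replaces A's outer index loop with a nested lookahead while that re-scans for the next valid row by one flat pass over the rows carrying an 'anchor' (the pending valid row) that absorbs following invalid rows and is flushed when the next valid row or the end is reached.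
import Mathlib
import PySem

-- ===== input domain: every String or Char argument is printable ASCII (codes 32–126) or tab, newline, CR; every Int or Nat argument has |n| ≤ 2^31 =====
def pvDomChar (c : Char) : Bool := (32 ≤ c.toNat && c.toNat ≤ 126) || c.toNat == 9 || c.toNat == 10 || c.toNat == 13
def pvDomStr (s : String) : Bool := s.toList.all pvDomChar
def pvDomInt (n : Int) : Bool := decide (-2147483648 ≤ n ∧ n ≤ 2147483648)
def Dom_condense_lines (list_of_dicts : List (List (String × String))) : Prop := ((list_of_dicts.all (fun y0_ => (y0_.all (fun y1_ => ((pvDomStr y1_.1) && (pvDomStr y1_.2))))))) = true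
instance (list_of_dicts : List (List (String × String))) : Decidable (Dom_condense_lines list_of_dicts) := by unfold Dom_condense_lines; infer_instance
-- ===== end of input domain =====

-- B replaces A's outer-index loop with an inner lookahead scan by a flat single pass
-- keeping an unflushed 'anchor' row; both Pythons mutate the same input dicts in place,
-- the equivalence proved here is about the return value. Objective: simpler.

-- shared dict primitives over the association-list encoding (Python dict: first-match
-- lookup, assignment overwrites in place, new keys append)
def pvDictGet? (d : List (String × String)) (k : String) : Option String :=
  (d.find? (fun p => p.1 == k)).map (·.2)

def pvDictGetD (d : List (String × String)) (k dflt : String) : String :=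
  (pvDictGet? d k).getD dflt

def pvDictSet (d : List (String × String)) (k v : String) : List (String × String) :=
  match d with
  | [] => [(k, v)]
  | (k', v') :: rest => if k' == k then (k, v) :: rest else (k', v') :: pvDictSet rest k v

-- 'Dispensed NDC' in row and row['Dispensed NDC'] not in ['', 'nan']
def pvValidNDC (d : List (String × String)) : Bool :=
  match pvDictGet? d "Dispensed NDC" with
  | none => false
  | some v => !(v == "" || v == "nan")

-- for key in [...]: cur[key] = str(cur.get(key,'')) + ' ' + str(row.get(key,''))
def pvMergeRow (cur row : List (String × String)) : List (String × String) :=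
  ["Escript prescribed item", "Prescribed Item", "Dispensed Item"].foldl
    (fun cur key => pvDictSet cur key (pvDictGetD cur key "" ++ " " ++ pvDictGetD row key "")) cur

-- ===== PORT A =====
-- inner 'while next_index < len(...) and not valid(...)' loop: consumes the run of
-- invalid rows after current_dict, returning the merged dict and the remaining rows
def condenseInnerA (cur : List (String × String)) (rest : List (List (String × String))) :
    List (String × String) × List (List (String × String)) :=
  match rest with
  | [] => (cur, [])
  | r :: rs => if pvValidNDC r then (cur, r :: rs) else condenseInnerA (pvMergeRow cur r) rs

theorem condenseInnerA_length_le (cur : List (String × String))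
    (rest : List (List (String × String))) :
    (condenseInnerA cur rest).2.length ≤ rest.length := by
  induction rest generalizing cur with
  | nil => simp [condenseInnerA]
  | cons r rs ih =>
    simp only [condenseInnerA]
    split
    · simp
    · exact le_trans (ih _) (Nat.le_succ _)

-- outer 'while i < len(list_of_dicts)' loop, as recursion on the remaining suffix
def condense_lines (list_of_dicts : List (List (String × String))) : List (List (String × String)) :=
  match h : list_of_dicts with
  | [] => []
  | d :: rest =>
    if pvValidNDC d then
      let p := condenseInnerA d rest
      p.1 :: condense_lines p.2
    else
      d :: condense_lines rest
termination_by list_of_dicts.length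
decreasing_by
  · simpa using Nat.lt_succ_of_le (condenseInnerA_length_le d rest)
  · simp

-- ===== PORT B =====
-- single pass: fold carrying (condensed_list, anchor); flush the anchor at the end
def condenseStepB (s : List (List (String × String)) × Option (List (String × String)))
    (row : List (String × String)) :
    List (List (String × String)) × Option (List (String × String)) :=
  if pvValidNDC row then
    match s.2 with
    | some a => (s.1 ++ [a], some row)
    | none => (s.1, some row)
  else
    match s.2 with
    | none => (s.1 ++ [row], none)
    | some a => (s.1, some (pvMergeRow a row))

def condense_lines_alt (list_of_dicts : List (List (String × String))) : List (List (String × String)) :=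
  let s := list_of_dicts.foldl condenseStepB ([], none)
  match s.2 with
  | some a => s.1 ++ [a]
  | none => s.1

-- ===== PRECONDITION & SPEC =====
def Spec_condense_lines (list_of_dicts : List (List (String × String))) (out : List (List (String × String))) : Prop := out = condense_lines_alt list_of_dicts
instance (list_of_dicts : List (List (String × String))) (out : List (List (String × String))) : Decidable (Spec_condense_lines list_of_dicts out) := by unfold Spec_condense_lines; infer_instance

-- ===== CLAIM (what is proved, stated in full; the proofs are below) =====
def Claim_equal_condense_lines : Prop := ∀ (list_of_dicts : List (List (String × String))), Dom_condense_lines list_of_dicts → Spec_condense_lines list_of_dicts (condense_lines list_of_dicts)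

-- ===== LEMMAS AND PROOFS =====

-- finishing step of B, named for the proofs
def pvFinishB (s : List (List (String × String)) × Option (List (String × String))) :
    List (List (String × String)) :=
  match s.2 with
  | some a => s.1 ++ [a]
  | none => s.1

-- B's fold from an anchored state computes A's inner absorption run
theorem foldB_some (l : List (List (String × String)))
    (out : List (List (String × String))) (a : List (String × String)) :
    pvFinishB (l.foldl condenseStepB (out, some a)) =
      out ++ (condenseInnerA a l).1 :: condense_lines (condenseInnerA a l).2 := by
  induction l generalizing out a with
  | nil => simp [pvFinishB, condenseInnerA, condense_lines]
  | cons r rs ih =>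
    by_cases hv : pvValidNDC r
    · rw [List.foldl_cons]
      simp only [condenseStepB, hv, if_pos, condenseInnerA]
      rw [ih (out ++ [a]) r]
      simp [condense_lines, hv]
    · rw [List.foldl_cons]
      simp only [condenseStepB, hv, Bool.false_eq_true, if_false]
      rw [ih out (pvMergeRow a r)]
      simp [condenseInnerA, hv]

-- B's fold from an anchorless state computes A's outer loop
theorem foldB_none (l : List (List (String × String)))
    (out : List (List (String × String))) :
    pvFinishB (l.foldl condenseStepB (out, none)) = out ++ condense_lines l := by
  induction l generalizing out with
  | nil => simp [pvFinishB, condense_lines]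
  | cons r rs ih =>
    by_cases hv : pvValidNDC r
    · rw [List.foldl_cons]
      simp only [condenseStepB, hv, if_pos]
      rw [foldB_some rs out r]
      simp [condense_lines, hv]
    · rw [List.foldl_cons]
      simp only [condenseStepB, hv, Bool.false_eq_true, if_false]
      rw [ih (out ++ [r])]
      simp [condense_lines, hv]

-- ===== VERDICT (by name: the statement is the Claim_ definition above) =====
theorem condense_lines_spec : Claim_equal_condense_lines := by
  intro l _
  show condense_lines l = condense_lines_alt l
  have h := foldB_none l []
  simpa [condense_lines_alt, pvFinishB] using h.symm
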